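-- pv_equiv track=rewrite | github.com/vadim566/laragames | SVN/trunk/Code/Python/lara_tmp_utils.py | add_markup_to_hebrew_palindrome_str
-- ===== SOURCE A (Python) =====
-- def add_markup_to_hebrew_palindrome_str(InStr):
--     ( OutStr, I, N, State ) = ( '', 0, len(InStr), 'not_in_sentence' )
--     while True:
--         if I >= N:
--             return OutStr
--         c = InStr[I]
--         if c == '.':
--             OutStr += '}}||\n'
--             State = 'not_in_sentence'
--             I += 1
--         elif State == 'not_in_sentence' and not c.isspace():
--             State = 'in_sentence'
--             OutStr += '{{'
--             OutStr += c
--             I += 1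
--         elif c == '\n' and State == 'in_sentence':
--             OutStr += ' '
--             I += 1
--         elif c.isspace() and State == 'not_in_sentence':
--             I += 1
--         else:
--             OutStr += c
--             I += 1
-- ===== SOURCE B (Python) =====
-- def add_markup_to_hebrew_palindrome_str(InStr):
--     parts = InStr.split('.')
--     out = []
--     for i, part in enumerate(parts):
--         stripped = part.lstrip()
--         if stripped:
--             out.append('{{')
--             out.append(stripped.replace('\n', ' '))
--         if i < len(parts) - 1:
--             out.append('}}||\n')
--     return ''.join(out)
-- ===== Notes on version B (the rewrite author's own statement) =====
-- stated objective: faster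
-- what changed: Replaces the index-driven two-state character machine (with quadratic string concatenation) by a split-on-dot pass that lstrips each segment, opens non-empty segments with the sentence marker, maps newlines to spaces, and joins the chunks with the separator marker between segments.
import Mathlib
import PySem

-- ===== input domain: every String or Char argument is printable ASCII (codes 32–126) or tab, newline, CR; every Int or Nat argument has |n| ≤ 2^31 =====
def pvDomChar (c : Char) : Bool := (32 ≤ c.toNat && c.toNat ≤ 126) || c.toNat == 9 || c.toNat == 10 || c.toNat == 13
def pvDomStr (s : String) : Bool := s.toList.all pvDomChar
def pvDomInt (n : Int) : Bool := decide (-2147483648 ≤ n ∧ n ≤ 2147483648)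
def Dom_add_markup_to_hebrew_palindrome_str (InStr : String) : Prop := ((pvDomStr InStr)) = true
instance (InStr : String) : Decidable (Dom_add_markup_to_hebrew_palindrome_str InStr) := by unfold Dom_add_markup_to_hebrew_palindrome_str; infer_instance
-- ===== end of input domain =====

-- B replaces A's index-driven two-state machine by split('.') + a per-segment transform (simpler decomposition).

-- ===== PORT A =====
-- the '}}||\n' marker appended on every '.'
def pvMark : List Char := ['}', '}', '|', '|', '\n']

-- the while-loop of A: remaining input, State ('in_sentence' = true), OutStr accumulator
def pvLoopA : List Char → Bool → List Char → List Char
  | [], _, out => out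
  | c :: t, inSent, out =>
    if c = '.' then pvLoopA t false (out ++ pvMark)
    else if inSent = false ∧ PySem.Chars.isspace c = false then
      pvLoopA t true (out ++ ['{', '{', c])
    else if c = '\n' ∧ inSent = true then pvLoopA t inSent (out ++ [' '])
    else if PySem.Chars.isspace c = true ∧ inSent = false then pvLoopA t inSent out
    else pvLoopA t inSent (out ++ [c])

def add_markup_to_hebrew_palindrome_str (InStr : String) : String :=
  String.mk (pvLoopA InStr.toList false [])

-- ===== PORT B =====
-- part.lstrip(); '' stays empty, otherwise '{{' + stripped.replace('\n',' ')
-- (str.replace with one-character old and new is exactly the per-character map)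
def pvSub (c : Char) : Char := if c = '\n' then ' ' else c

def pvChunkB (part : List Char) : List Char :=
  let s := PySem.Chars.lstrip part
  if s = [] then [] else ['{', '{'] ++ s.map pvSub

-- the join of the per-part chunks, with '}}||\n' after every part but the last
def pvJoinB : List (List Char) → List Char
  | [] => []
  | [p] => pvChunkB p
  | p :: q :: rest => pvChunkB p ++ pvMark ++ pvJoinB (q :: rest)

def add_markup_to_hebrew_palindrome_str_alt (InStr : String) : String :=
  String.mk (pvJoinB (InStr.toList.splitOn '.'))

-- ===== PRECONDITION & SPEC =====
def Spec_add_markup_to_hebrew_palindrome_str (InStr : String) (out : String) : Prop := out = add_markup_to_hebrew_palindrome_str_alt InStr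
instance (InStr : String) (out : String) : Decidable (Spec_add_markup_to_hebrew_palindrome_str InStr out) := by unfold Spec_add_markup_to_hebrew_palindrome_str; infer_instance

-- ===== CLAIM (what is proved, stated in full; the proofs are below) =====
def Claim_equal_add_markup_to_hebrew_palindrome_str : Prop := ∀ (InStr : String), Dom_add_markup_to_hebrew_palindrome_str InStr → Spec_add_markup_to_hebrew_palindrome_str InStr (add_markup_to_hebrew_palindrome_str InStr)

-- ===== LEMMAS AND PROOFS =====

-- what remains of B's output after the current segment: nothing if it was the last part
def pvTailB (ps : List (List Char)) : List Char :=
  if ps = [] then [] else pvMark ++ pvJoinB ps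

lemma pvJoinB_cons (p : List Char) (r : List (List Char)) :
    pvJoinB (p :: r) = pvChunkB p ++ pvTailB r := by
  cases r with
  | nil => simp [pvJoinB, pvTailB]
  | cons q rest => simp [pvJoinB, pvTailB]

lemma pvChunkB_cons_space {c : Char} (h : PySem.Chars.isspace c = true) (p : List Char) :
    pvChunkB (c :: p) = pvChunkB p := by
  simp [pvChunkB, PySem.Chars.lstrip, h]

lemma pvChunkB_cons_nonspace {c : Char} (h : PySem.Chars.isspace c = false) (p : List Char) :
    pvChunkB (c :: p) = ['{', '{'] ++ (c :: p).map pvSub := by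
  simp [pvChunkB, PySem.Chars.lstrip, h]

lemma pvMain (cs : List Char) :
    (∀ out, pvLoopA cs false out = out ++ pvJoinB (cs.splitOnP (· == '.'))) ∧
    (∀ out, pvLoopA cs true out =
      out ++ (cs.splitOnP (· == '.')).headI.map pvSub ++ pvTailB (cs.splitOnP (· == '.')).tail) := by
  induction cs with
  | nil =>
    constructor <;> intro out <;>
      simp [pvLoopA, List.splitOnP_nil, pvJoinB, pvChunkB, PySem.Chars.lstrip, pvTailB]
  | cons c t ih =>
    obtain ⟨h, r, hP⟩ := List.exists_cons_of_ne_nil (List.splitOnP_ne_nil (· == '.') t)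
    by_cases hdot : c = '.'
    · subst hdot
      constructor <;> intro out
      · rw [show pvLoopA ('.' :: t) false out = pvLoopA t false (out ++ pvMark) from rfl,
            (ih.1 (out ++ pvMark))]
        simp [List.splitOnP_cons, pvJoinB_cons, pvChunkB, PySem.Chars.lstrip, pvTailB,
              List.splitOnP_ne_nil]
      · rw [show pvLoopA ('.' :: t) true out = pvLoopA t false (out ++ pvMark) from rfl,
            (ih.1 (out ++ pvMark))]
        simp [List.splitOnP_cons, pvTailB, List.splitOnP_ne_nil]
    · have hsplit : (c :: t).splitOnP (· == '.') = (c :: h) :: r := by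
        simp [List.splitOnP_cons, hdot, hP]
      by_cases hsp : PySem.Chars.isspace c = true
      · constructor <;> intro out
        · -- not in sentence, whitespace: skipped by A, lstripped by B
          rw [show pvLoopA (c :: t) false out = pvLoopA t false out from by
                simp [pvLoopA, hdot, hsp],
              ih.1 out, hsplit, hP, pvJoinB_cons, pvJoinB_cons, pvChunkB_cons_space hsp]
        · -- in sentence, whitespace: '\n' becomes ' ', others verbatim
          by_cases hn : c = '\n'
          · subst hn
            rw [show pvLoopA ('\n' :: t) true out = pvLoopA t true (out ++ [' ']) from by
                  simp [pvLoopA, hdot, hsp],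
                ih.2 (out ++ [' ']), hsplit, hP]
            simp [pvSub]
          · rw [show pvLoopA (c :: t) true out = pvLoopA t true (out ++ [c]) from by
                  simp [pvLoopA, hdot, hsp, hn],
                ih.2 (out ++ [c]), hsplit, hP]
            simp [pvSub, hn]
      · have hsp' : PySem.Chars.isspace c = false := by simpa using hsp
        have hn : c ≠ '\n' := by
          intro h'; subst h'; simp [PySem.Chars.isspace] at hsp'
        constructor <;> intro out
        · -- not in sentence, non-space: A opens '{{', B's chunk keeps the whole segment
          rw [show pvLoopA (c :: t) false out = pvLoopA t true (out ++ ['{', '{', c]) from by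
                simp [pvLoopA, hdot, hsp'],
              (ih.2 (out ++ ['{', '{', c])), hsplit, hP, pvJoinB_cons,
              pvChunkB_cons_nonspace hsp']
          simp [pvSub, hn]
        · -- in sentence, non-space: appended verbatim on both sides
          rw [show pvLoopA (c :: t) true out = pvLoopA t true (out ++ [c]) from by
                simp [pvLoopA, hdot, hsp', hn],
              ih.2 (out ++ [c]), hsplit, hP]
          simp [pvSub, hn]

-- ===== VERDICT (by name: the statement is the Claim_ definition above) =====
theorem add_markup_to_hebrew_palindrome_str_spec : Claim_equal_add_markup_to_hebrew_palindrome_str := by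
  intro InStr _
  unfold Spec_add_markup_to_hebrew_palindrome_str
  unfold add_markup_to_hebrew_palindrome_str add_markup_to_hebrew_palindrome_str_alt
  rw [(pvMain InStr.toList).1 []]
  rfl
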